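-- pv_equiv track=rewrite | github.com/kcct-fujimotolab/chainer-image-gen-nets | gennet/dcgan/net.py | conved_image_size
-- ===== SOURCE A (Python) =====
-- def conved_image_size(image_size, max_n_ch=512):
--     n_conv = 4
--     conved_size = image_size
--     for i in range(n_conv):
--         kwargs = get_conv2d_kwargs(i, image_size=image_size, max_n_ch=max_n_ch)
--         conved_size = check_conved_size(conved_size, kwargs['ksize'], kwargs[
--                                         'stride'], kwargs['pad'])
--     return conved_size
--
-- def check_conved_size(image_size, ksize, stride=1, pad=0):
--     return int((image_size - ksize + 2 * pad) / stride) + 1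
--
-- def get_conv2d_kwargs(i, image_size=64, n_color=3, max_n_ch=512, deconv=False):
--     n_conv = 4
--     channels = [n_color] + [max_n_ch // (2 ** x)
--                             for x in range(0, n_conv)][::-1]
--
--     if image_size == 64:
--         kernel = [
--             {'ksize': 4, 'stride': 2, 'pad': 1},  # 64 -> 32
--             {'ksize': 4, 'stride': 2, 'pad': 1},  # 32 -> 16
--             {'ksize': 4, 'stride': 2, 'pad': 1},  # 16 -> 8
--             {'ksize': 4, 'stride': 2, 'pad': 1},  # 8 -> 4
--         ]
--     elif image_size == 32:
--         kernel = [
--             {'ksize': 3, 'stride': 1, 'pad': 1},  # 32 -> 32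
--             {'ksize': 4, 'stride': 2, 'pad': 1},  # 32 -> 16
--             {'ksize': 4, 'stride': 2, 'pad': 1},  # 16 -> 8
--             {'ksize': 4, 'stride': 2, 'pad': 1},  # 8 -> 4
--         ]
--     elif image_size == 28:
--         kernel = [
--             {'ksize': 3, 'stride': 3, 'pad': 1},  # 28 -> 10
--             {'ksize': 2, 'stride': 2, 'pad': 1},  # 10 -> 6
--             {'ksize': 2, 'stride': 2, 'pad': 1},  # 6 -> 4
--             {'ksize': 2, 'stride': 2, 'pad': 1},  # 4 -> 3
--         ]
--     else:
--         raise NotImplementedError(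
--             '(image_size == {}) is not implemented'.format(image_size))
--
--     if deconv:
--         kwargs = {
--             'in_channels': channels[n_conv - i],
--             'out_channels': channels[n_conv - i - 1],
--         }
--         kwargs.update(kernel[n_conv - i - 1])
--     else:
--         kwargs = {
--             'in_channels': channels[i],
--             'out_channels': channels[i + 1],
--         }
--         kwargs.update(kernel[i])
--
--     return kwargs
-- ===== SOURCE B (Python) =====
-- # B: the conv-size recurrence is eliminated entirely. The final size depends only
-- # on image_size (each supported size has a fixed kernel schedule), so B returns the
-- # precomputed closed-form result from a mapping: 64 -> 4, 32 -> 4, 28 -> 3.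
-- # max_n_ch is accepted and ignored: it only affects channel counts, never the size.
-- _FINAL_SIZE = {64: 4, 32: 4, 28: 3}
--
-- def conved_image_size(image_size, max_n_ch=512):
--     try:
--         return _FINAL_SIZE[image_size]
--     except KeyError:
--         raise NotImplementedError(
--             '(image_size == {}) is not implemented'.format(image_size))
-- ===== Notes on version B (the rewrite author's own statement) =====
-- stated objective: simpler
-- what changed: B eliminates the four-layer conv-size recurrence and the get_conv2d_kwargs/channels/deconv machinery entirely: since the output depends only on image_size, B returns the precomputed closed-form answer from a mapping {64: 4, 32: 4, 28: 3}, raising the identical NotImplementedError otherwise; max_n_ch is ignored as it never affects the size.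
import Mathlib
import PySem

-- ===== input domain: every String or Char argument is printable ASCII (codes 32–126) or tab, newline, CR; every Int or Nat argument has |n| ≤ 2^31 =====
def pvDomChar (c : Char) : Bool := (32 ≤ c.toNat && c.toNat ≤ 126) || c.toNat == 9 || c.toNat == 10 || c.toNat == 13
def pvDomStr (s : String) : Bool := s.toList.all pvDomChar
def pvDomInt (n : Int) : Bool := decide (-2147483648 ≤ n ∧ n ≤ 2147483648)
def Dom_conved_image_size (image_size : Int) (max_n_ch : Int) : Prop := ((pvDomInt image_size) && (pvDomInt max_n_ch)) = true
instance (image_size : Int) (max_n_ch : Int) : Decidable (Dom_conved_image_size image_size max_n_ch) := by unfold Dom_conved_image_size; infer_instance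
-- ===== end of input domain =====

-- B replaces A's four-layer conv-size recurrence (and its per-layer kwargs machinery)
-- with a precomputed closed-form mapping image_size -> final size (simpler; same cost).
-- Both programs raise NotImplementedError for image_size ∉ {64, 32, 28}; outside Pre_.

-- ===== PORT A =====
-- check_conved_size: int((image_size - ksize + 2*pad)/stride) + 1; int(a/b) is exact
-- truncating division here (all values far below 2^53), ported with PySem.Int.truncdiv.
def checkConvedSize (image_size ksize stride pad : Int) : Int :=
  PySem.Int.truncdiv (image_size - ksize + 2 * pad) stride + 1

-- get_conv2d_kwargs: returns none exactly where Python raises NotImplementedError.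
-- channels[..] and kernel[..] indexing is ported with pyGetD (the calls made by A always
-- index in range, so the default is never used).
def getConv2dKwargs (i image_size n_color max_n_ch : Int) (deconv : Bool) :
    Option (PySem.Dict String Int) :=
  let n_conv : Int := 4
  let channels : List Int :=
    [n_color] ++ (((PySem.List.pyRange 0 n_conv 1).map
      (fun x => PySem.Int.floordiv max_n_ch ((2 : Int) ^ x.toNat))).reverse)
  let kernel? : Option (List (PySem.Dict String Int)) :=
    if image_size = 64 then
      some [PySem.Dict.ofList [("ksize", 4), ("stride", 2), ("pad", 1)],
            PySem.Dict.ofList [("ksize", 4), ("stride", 2), ("pad", 1)],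
            PySem.Dict.ofList [("ksize", 4), ("stride", 2), ("pad", 1)],
            PySem.Dict.ofList [("ksize", 4), ("stride", 2), ("pad", 1)]]
    else if image_size = 32 then
      some [PySem.Dict.ofList [("ksize", 3), ("stride", 1), ("pad", 1)],
            PySem.Dict.ofList [("ksize", 4), ("stride", 2), ("pad", 1)],
            PySem.Dict.ofList [("ksize", 4), ("stride", 2), ("pad", 1)],
            PySem.Dict.ofList [("ksize", 4), ("stride", 2), ("pad", 1)]]
    else if image_size = 28 then
      some [PySem.Dict.ofList [("ksize", 3), ("stride", 3), ("pad", 1)],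
            PySem.Dict.ofList [("ksize", 2), ("stride", 2), ("pad", 1)],
            PySem.Dict.ofList [("ksize", 2), ("stride", 2), ("pad", 1)],
            PySem.Dict.ofList [("ksize", 2), ("stride", 2), ("pad", 1)]]
    else none
  match kernel? with
  | none => none
  | some kernel =>
    let kwargs : PySem.Dict String Int :=
      if deconv then
        PySem.Dict.ofList
          [("in_channels", PySem.List.pyGetD channels (n_conv - i) 0),
           ("out_channels", PySem.List.pyGetD channels (n_conv - i - 1) 0)]
      else
        PySem.Dict.ofList
          [("in_channels", PySem.List.pyGetD channels i 0),
           ("out_channels", PySem.List.pyGetD channels (i + 1) 0)]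
    let kidx : Int := if deconv then n_conv - i - 1 else i
    let kd : PySem.Dict String Int := PySem.List.pyGetD kernel kidx PySem.Dict.empty
    -- kwargs.update(kernel[...])
    some (kd.items.foldl (fun d kv => d.insert kv.1 kv.2) kwargs)

def conved_image_size (image_size : Int) (max_n_ch : Int) : Int :=
  (PySem.List.pyRange 0 4 1).foldl
    (fun conved_size i =>
      match getConv2dKwargs i image_size 3 max_n_ch false with
      | none => conved_size  -- Python raises here (image_size ∉ {64,32,28}); outside Pre_
      | some kwargs =>
          checkConvedSize conved_size (kwargs.getD "ksize" 0)
            (kwargs.getD "stride" 0) (kwargs.getD "pad" 0))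
    image_size

-- ===== PORT B =====
-- _FINAL_SIZE dict lookup; none = KeyError path, where B raises NotImplementedError.
def finalSizeTable : PySem.Dict Int Int := PySem.Dict.ofList [(64, 4), (32, 4), (28, 3)]

def conved_image_size_alt (image_size : Int) (max_n_ch : Int) : Int :=
  match finalSizeTable.get? image_size with
  | some v => v
  | none => image_size  -- B raises NotImplementedError here; outside Pre_

-- ===== PRECONDITION & SPEC =====
-- Pre_: exactly the supported sizes; on any other image_size both A and B raise
-- NotImplementedError with the same message.
def Pre_conved_image_size (image_size : Int) (max_n_ch : Int) : Prop :=
  image_size = 64 ∨ image_size = 32 ∨ image_size = 28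
instance (image_size : Int) (max_n_ch : Int) : Decidable (Pre_conved_image_size image_size max_n_ch) := by
  unfold Pre_conved_image_size; infer_instance

def pvWitness_conved_image_size : Int × Int := (64, 512)

def Spec_conved_image_size (image_size : Int) (max_n_ch : Int) (out : Int) : Prop :=
  out = conved_image_size_alt image_size max_n_ch
instance (image_size : Int) (max_n_ch : Int) (out : Int) : Decidable (Spec_conved_image_size image_size max_n_ch out) := by
  unfold Spec_conved_image_size; infer_instance

-- ===== CLAIM (what is proved, stated in full; the proofs are below) =====
def Claim_equal_conved_image_size : Prop :=
  ∀ (image_size : Int) (max_n_ch : Int), Dom_conved_image_size image_size max_n_ch →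
    Pre_conved_image_size image_size max_n_ch →
    Spec_conved_image_size image_size max_n_ch (conved_image_size image_size max_n_ch)

-- ===== LEMMAS AND PROOFS =====
-- On each supported size A computes a constant (4, 4 or 3) independent of max_n_ch:
-- the channel values A builds from max_n_ch sit under keys ("in_channels",
-- "out_channels") the size computation never reads; B's table holds those constants.
lemma pyRange4 : PySem.List.pyRange 0 4 1 = [0, 1, 2, 3] := by decide

lemma portA_64 (m : Int) : conved_image_size 64 m = 4 := by
  rw [conved_image_size, pyRange4]
  simp only [List.foldl]
  simp [getConv2dKwargs, checkConvedSize, PySem.Dict.ofList, PySem.Dict.getD, PySem.Dict.get?, PySem.Dict.insert, PySem.Dict.contains, List.foldl,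
        PySem.List.pyGetD, PySem.List.pyGet?, PySem.List.pyIdx?, PySem.Dict.update,
        PySem.Dict.empty]
  decide

lemma portA_32 (m : Int) : conved_image_size 32 m = 4 := by
  rw [conved_image_size, pyRange4]
  simp only [List.foldl]
  simp [getConv2dKwargs, checkConvedSize, PySem.Dict.ofList, PySem.Dict.getD, PySem.Dict.get?, PySem.Dict.insert, PySem.Dict.contains, List.foldl,
        PySem.List.pyGetD, PySem.List.pyGet?, PySem.List.pyIdx?, PySem.Dict.update,
        PySem.Dict.empty]
  decide

lemma portA_28 (m : Int) : conved_image_size 28 m = 3 := by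
  rw [conved_image_size, pyRange4]
  simp only [List.foldl]
  simp [getConv2dKwargs, checkConvedSize, PySem.Dict.ofList, PySem.Dict.getD, PySem.Dict.get?, PySem.Dict.insert, PySem.Dict.contains, List.foldl,
        PySem.List.pyGetD, PySem.List.pyGet?, PySem.List.pyIdx?, PySem.Dict.update,
        PySem.Dict.empty]
  decide

lemma portB_64 (m : Int) : conved_image_size_alt 64 m = 4 := by simp [conved_image_size_alt, finalSizeTable, PySem.Dict.ofList, PySem.Dict.get?, PySem.Dict.update, PySem.Dict.empty, PySem.Dict.insert, PySem.Dict.contains, List.foldl, List.find?]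
lemma portB_32 (m : Int) : conved_image_size_alt 32 m = 4 := by simp [conved_image_size_alt, finalSizeTable, PySem.Dict.ofList, PySem.Dict.get?, PySem.Dict.update, PySem.Dict.empty, PySem.Dict.insert, PySem.Dict.contains, List.foldl, List.find?]
lemma portB_28 (m : Int) : conved_image_size_alt 28 m = 3 := by simp [conved_image_size_alt, finalSizeTable, PySem.Dict.ofList, PySem.Dict.get?, PySem.Dict.update, PySem.Dict.empty, PySem.Dict.insert, PySem.Dict.contains, List.foldl, List.find?]

-- ===== VERDICT (by name: the statement is the Claim_ definition above) =====
theorem conved_image_size_spec : Claim_equal_conved_image_size := by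
  intro s m _ hpre
  unfold Spec_conved_image_size
  rcases hpre with h | h | h <;> subst h
  · rw [portA_64, portB_64]
  · rw [portA_32, portB_32]
  · rw [portA_28, portB_28]
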